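-- pv_equiv track=rewrite | github.com/rf-iasys/OEIS | OEIS_A085302_3.py | generate_A085302
-- ===== SOURCE A (Python) =====
-- def is_prime(x):
--     if x < 2:
--         return False
--     for i in range(2, int(x**0.5) + 1):
--         if x % i == 0:
--             return False
--     return True
--
-- def generate_primes(n_max):
--     primes = []
--     candidate = 2
--     while len(primes) < n_max:
--         if is_prime(candidate):
--             primes.append(candidate)
--         candidate += 1
--     return primes
--
-- def fn_oeis(x):
--     """Compute the OEIS function in integer arithmetic."""
--     k = 1
--     r = x
--     while r >= 1:
--         k += 1
--         r //= k  # integer division avoids overflow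
--     return k - 1
--
-- def generate_A085302(n_max):
--     """Generate A085302 using incremental primorials."""
--     primes = generate_primes(n_max)
--     sequence = []
--     n_prim = 1  # incremental primorial
--
--     for i, p in enumerate(primes, start=1):
--         n_prim *= p
--         if i == 1:
--             sequence.append(2)
--         else:
--             sequence.append(fn_oeis(n_prim) + 1)
--     return sequence
-- ===== SOURCE B (Python) =====
-- def generate_A085302(n_max):
--     """Generate A085302 via primes-only trial division and an incremental factorial bound."""
--     primes = []
--     candidate = 2
--     while len(primes) < n_max:
--         is_p = True
--         for p in primes:
--             if p * p > candidate:
--                 break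
--             if candidate % p == 0:
--                 is_p = False
--                 break
--         if is_p:
--             primes.append(candidate)
--         candidate += 1
--
--     sequence = []
--     prim = 1
--     k = 1
--     fact = 1
--     first = True
--     for p in primes:
--         prim *= p
--         while fact * (k + 1) <= prim:
--             k += 1
--             fact *= k
--         sequence.append(2 if first else k + 1)
--         first = False
--     return sequence
-- ===== Notes on version B (the rewrite author's own statement) =====
-- stated objective: faster
-- what changed: Primality is tested by dividing only by the primes already found (up to sqrt) instead of by every integer up to sqrt, and the per-prime value is obtained by advancing one incremental (k, k!) pair against the growing primorial instead of recomputing fn_oeis by repeated big-integer floor divisions of the primorial for every prime.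
import Mathlib
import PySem

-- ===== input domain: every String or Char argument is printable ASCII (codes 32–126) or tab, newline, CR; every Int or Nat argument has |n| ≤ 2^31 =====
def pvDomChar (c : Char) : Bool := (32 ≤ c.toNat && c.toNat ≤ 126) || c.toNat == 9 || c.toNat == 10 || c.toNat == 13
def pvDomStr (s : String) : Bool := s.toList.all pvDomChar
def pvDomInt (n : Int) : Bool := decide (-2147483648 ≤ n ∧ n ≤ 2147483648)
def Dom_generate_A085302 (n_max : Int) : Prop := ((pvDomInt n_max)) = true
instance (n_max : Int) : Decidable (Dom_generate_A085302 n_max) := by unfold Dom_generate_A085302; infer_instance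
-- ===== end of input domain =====

-- B replaces A's two inner scans: it trial-divides each candidate only by the primes found so far
-- (with break at p*p > candidate) and advances one incremental (k, k!) pair against the growing
-- primorial instead of recomputing fn_oeis by repeated floor divisions for every prime.
-- Both while-loop ports carry a decreasing fuel counter as a totality guard only: the fuel
-- expression is identical on both sides and large enough that the guarded branch is the one
-- Python takes (candidates never reach 2^n_max + 2 before n_max primes are found, and the two
-- inner loops run fewer than their starting r / prim iterations).

-- ===== PORT A =====

-- port of Python is_prime (candidates are nonnegative ints, kept as Nat; int(x**0.5) is exact
-- integer sqrt on the admitted domain |x| ≤ 2^31, where the double sqrt cannot round across an integer)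
def is_prime (x : Nat) : Bool :=
  if x < 2 then false
  else (List.range' 2 (Nat.sqrt x - 1) 1).all (fun i => x % i != 0)

-- port of Python generate_primes' while loop (fuel = totality guard, see header)
def loopA (n_max : Int) (fuel : Nat) (primes : List Nat) (c : Nat) : List Nat :=
  match fuel with
  | 0 => primes
  | f + 1 =>
    if (primes.length : Int) < n_max then
      if is_prime c then loopA n_max f (primes ++ [c]) (c + 1)
      else loopA n_max f primes (c + 1)
    else primes

def generate_primes (n_max : Int) : List Nat := loopA n_max (2 ^ n_max.toNat + 2) [] 2

-- port of Python fn_oeis's while loop (its r decreases strictly, so r itself bounds the iterations)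
def fnLoop (fuel k r : Nat) : Nat :=
  match fuel with
  | 0 => k
  | f + 1 => if 1 ≤ r then fnLoop f (k + 1) (r / (k + 1)) else k

def fn_oeis (x : Nat) : Nat := fnLoop x 1 x - 1

-- port of Python generate_A085302's for-loop over enumerate(primes, start=1)
def seqA (ps : List Nat) (i : Nat) (prim : Nat) : List Int :=
  match ps with
  | [] => []
  | p :: rest =>
    let prim' := prim * p
    (if i = 1 then (2 : Int) else ((fn_oeis prim' : Int) + 1)) :: seqA rest (i + 1) prim'

def generate_A085302 (n_max : Int) : List Int :=
  seqA (generate_primes n_max) 1 1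

-- ===== PORT B =====

-- B's inner for-loop over the primes found so far, with its two breaks
def testB (c : Nat) : List Nat → Bool
  | [] => true
  | p :: ps => if c < p * p then true else if c % p = 0 then false else testB c ps

-- port of B's while loop: candidates tested by dividing only by the primes already found
def loopB (n_max : Int) (fuel : Nat) (primes : List Nat) (c : Nat) : List Nat :=
  match fuel with
  | 0 => primes
  | f + 1 =>
    if (primes.length : Int) < n_max then
      if testB c primes then loopB n_max f (primes ++ [c]) (c + 1)
      else loopB n_max f primes (c + 1)
    else primes

-- port of B's incremental while loop advancing (k, fact) against prim (k stays below prim,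
-- so prim bounds the iterations)
def advB (fuel k fact prim : Nat) : Nat × Nat :=
  match fuel with
  | 0 => (k, fact)
  | f + 1 =>
    if fact * (k + 1) ≤ prim then advB f (k + 1) (fact * (k + 1)) prim else (k, fact)

-- port of B's for-loop over primes
def seqB (ps : List Nat) (prim k fact : Nat) (first : Bool) : List Int :=
  match ps with
  | [] => []
  | p :: rest =>
    let prim' := prim * p
    let kf := advB prim' k fact prim'
    (if first then (2 : Int) else ((kf.1 : Int) + 1)) :: seqB rest prim' kf.1 kf.2 false

def generate_A085302_alt (n_max : Int) : List Int :=
  seqB (loopB n_max (2 ^ n_max.toNat + 2) [] 2) 1 1 1 true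

-- ===== PRECONDITION & SPEC =====
def Spec_generate_A085302 (n_max : Int) (out : List Int) : Prop := out = generate_A085302_alt n_max
instance (n_max : Int) (out : List Int) : Decidable (Spec_generate_A085302 n_max out) := by unfold Spec_generate_A085302; infer_instance

-- ===== CLAIM (what is proved, stated in full; the proofs are below) =====
def Claim_equal_generate_A085302 : Prop := ∀ (n_max : Int), Dom_generate_A085302 n_max → Spec_generate_A085302 n_max (generate_A085302 n_max)

-- ===== LEMMAS AND PROOFS =====

-- the canonical list of all primes below c, in increasing order
def prList (c : Nat) : List Nat := (List.range c).filter (fun q => decide (Nat.Prime q))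

theorem prList_two_le {c : Nat} : ∀ p ∈ prList c, 2 ≤ p := by
  intro p hp
  have : Nat.Prime p := by simpa using (List.mem_filter.mp hp).2
  exact this.two_le

theorem prList_succ (c : Nat) :
    prList (c + 1) = prList c ++ (if Nat.Prime c then [c] else []) := by
  unfold prList
  rw [List.range_succ, List.filter_append]
  by_cases h : Nat.Prime c <;> simp [h]

theorem is_prime_false (c : Nat) (h : is_prime c = false) : ¬ Nat.Prime c := by
  intro hp
  have h2 : 2 ≤ c := hp.two_le
  unfold is_prime at h
  rw [if_neg (by omega)] at h
  simp only [List.all_eq_false] at h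
  obtain ⟨i, hi, hmod⟩ := h
  rw [List.mem_range'] at hi
  obtain ⟨j, hj, hij⟩ := hi
  have hdvd : i ∣ c := Nat.dvd_of_mod_eq_zero (by simpa using hmod)
  have : 2 ≤ i := by omega
  have hle : i ≤ Nat.sqrt c := by omega
  exact (Nat.prime_def_le_sqrt.mp hp).2 i this hle hdvd

theorem is_prime_iff (c : Nat) : is_prime c = true ↔ Nat.Prime c := by
  constructor
  · intro h
    unfold is_prime at h
    split_ifs at h with h2
    rw [List.all_eq_true] at h
    rw [Nat.prime_def_le_sqrt]
    refine ⟨by omega, ?_⟩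
    intro m hm hms hdvd
    have hmem : m ∈ List.range' 2 (Nat.sqrt c - 1) 1 := by
      rw [List.mem_range']
      exact ⟨m - 2, by omega, by omega⟩
    have := h m hmem
    simp [Nat.mod_eq_zero_of_dvd hdvd] at this
  · intro h
    cases hb : is_prime c
    · exact absurd h (is_prime_false c hb)
    · rfl

theorem testB_true_of (c : Nat) (ps : List Nat)
    (h : ∀ p ∈ ps, p * p ≤ c → ¬ p ∣ c) : testB c ps = true := by
  induction ps with
  | nil => rfl
  | cons p rest ih =>
    unfold testB
    split_ifs with h1 h2
    · rfl
    · exact absurd (Nat.dvd_of_mod_eq_zero h2) (h p (by simp) (by omega))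
    · exact ih (fun q hq => h q (by simp [hq]))

theorem testB_false_of (c : Nat) (ps : List Nat) (hsort : ps.Pairwise (· < ·))
    (q : Nat) (hq : q ∈ ps) (hdvd : q ∣ c) (hsq : q * q ≤ c) : testB c ps = false := by
  induction ps with
  | nil => simp at hq
  | cons p rest ih =>
    unfold testB
    have hple : p ≤ q := by
      rcases List.mem_cons.mp hq with h | h
      · omega
      · exact le_of_lt ((List.pairwise_cons.mp hsort).1 q h)
    split_ifs with h1 h2
    · nlinarith
    · rfl
    · rcases List.mem_cons.mp hq with h | h
      · subst h; exact absurd (Nat.mod_eq_zero_of_dvd hdvd) h2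
      · exact ih (List.pairwise_cons.mp hsort).2 h

theorem prList_pairwise (c : Nat) : (prList c).Pairwise (· < ·) :=
  List.Pairwise.filter _ List.pairwise_lt_range

-- under the loops' shared invariant (primes = all primes below c) the two primality tests agree
theorem testB_eq_is_prime (c : Nat) (hc : 2 ≤ c) : testB c (prList c) = is_prime c := by
  by_cases hp : Nat.Prime c
  · rw [(is_prime_iff c).mpr hp]
    apply testB_true_of
    intro p hpm hsq hdvd
    have hpp : Nat.Prime p := by simpa using (List.mem_filter.mp hpm).2
    have hlt : p < c := by simpa using (List.mem_filter.mp hpm).1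
    rcases (hp.eq_one_or_self_of_dvd p hdvd) with h | h
    · exact absurd h (by have := hpp.two_le; omega)
    · omega
  · cases hb : is_prime c
    · have hq : Nat.Prime (Nat.minFac c) := Nat.minFac_prime (by omega)
      have hsq : Nat.minFac c * Nat.minFac c ≤ c := by
        have := Nat.minFac_sq_le_self (n := c) (by omega) hp
        nlinarith [this]
      have hdvd : Nat.minFac c ∣ c := Nat.minFac_dvd c
      have hlt : Nat.minFac c < c := by nlinarith [hq.two_le]
      apply testB_false_of c (prList c) (prList_pairwise c) (Nat.minFac c) ?_ hdvd hsq
      exact List.mem_filter.mpr ⟨List.mem_range.mpr hlt, by simpa using hq⟩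
    · exact absurd ((is_prime_iff c).mp hb) hp

-- the two prime-generation loops run in lockstep and produce a prList
theorem loops_eq (n_max : Int) (fuel : Nat) : ∀ (c : Nat), 2 ≤ c →
    loopA n_max fuel (prList c) c = loopB n_max fuel (prList c) c ∧
    ∃ C, loopA n_max fuel (prList c) c = prList C := by
  induction fuel with
  | zero => intro c _; exact ⟨rfl, c, rfl⟩
  | succ f ih =>
    intro c hc
    rw [loopA, loopB]
    by_cases hlen : ((prList c).length : Int) < n_max
    · rw [if_pos hlen, if_pos hlen, testB_eq_is_prime c hc]
      by_cases hpr : is_prime c = true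
      · rw [if_pos hpr, if_pos hpr]
        have hprime : Nat.Prime c := (is_prime_iff c).mp hpr
        have hnext : prList c ++ [c] = prList (c + 1) := by
          rw [prList_succ, if_pos hprime]
        rw [hnext]
        exact ih (c + 1) (by omega)
      · rw [if_neg hpr, if_neg hpr]
        have hnp : ¬ Nat.Prime c := is_prime_false c (Bool.of_not_eq_true hpr)
        have hnext : prList c = prList (c + 1) := by
          rw [prList_succ, if_neg hnp, List.append_nil]
        rw [hnext]
        exact ih (c + 1) (by omega)
    · rw [if_neg hlen, if_neg hlen]
      exact ⟨rfl, c, rfl⟩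

-- characterisation of the per-prime value: kOf x is the largest k with k! ≤ x (for 1 ≤ x)
theorem kOf_ex (x : Nat) : ∃ k, x < (k + 1).factorial :=
  ⟨x, lt_of_lt_of_le (by omega) (Nat.self_le_factorial (x + 1))⟩

def kOf (x : Nat) : Nat := Nat.find (kOf_ex x)

theorem kOf_lt (x : Nat) : x < (kOf x + 1).factorial := Nat.find_spec (kOf_ex x)

theorem kOf_le (x k : Nat) (h : k.factorial ≤ x) : k ≤ kOf x := by
  by_contra hlt
  have h1 : kOf x + 1 ≤ k := by omega
  have := Nat.factorial_le h1
  have := kOf_lt x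
  omega

theorem kOf_unique (x k : Nat) (h1 : k.factorial ≤ x) (h2 : x < (k + 1).factorial) :
    kOf x = k :=
  le_antisymm (Nat.find_le h2) (kOf_le x k h1)

theorem kOf_fact_le (x : Nat) (hx : 1 ≤ x) : (kOf x).factorial ≤ x := by
  rcases Nat.eq_zero_or_pos (kOf x) with h | h
  · rw [h]; simpa [Nat.factorial] using hx
  · have hmin : ¬ x < (kOf x - 1 + 1).factorial :=
      Nat.find_min (kOf_ex x) (show kOf x - 1 < kOf x by omega)
    have he : kOf x - 1 + 1 = kOf x := by omega
    rw [he] at hmin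
    omega

theorem kOf_pos (x : Nat) (hx : 1 ≤ x) : 1 ≤ kOf x :=
  kOf_le x 1 (by simpa [Nat.factorial] using hx)

theorem kOf_one : kOf 1 = 1 := kOf_unique 1 1 (by simp [Nat.factorial]) (by simp [Nat.factorial])

theorem fnLoop_zero_r (f k : Nat) : fnLoop f k 0 = k := by
  cases f <;> simp [fnLoop]

-- A's division loop computes kOf + 1 (the loop's r strictly decreases, so r ≤ fuel suffices)
theorem fnLoop_spec (x : Nat) : ∀ (fuel k : Nat), 1 ≤ k → k.factorial ≤ x →
    x / k.factorial ≤ fuel → fnLoop fuel k (x / k.factorial) = kOf x + 1 := by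
  intro fuel
  induction fuel with
  | zero =>
    intro k hk hfle hfuel
    have := (Nat.one_le_div_iff (Nat.factorial_pos k)).mpr hfle
    omega
  | succ f ih =>
    intro k hk hfle hfuel
    have hr : 1 ≤ x / k.factorial := (Nat.one_le_div_iff (Nat.factorial_pos k)).mpr hfle
    rw [fnLoop, if_pos hr]
    have hdiv : x / k.factorial / (k + 1) = x / (k + 1).factorial := by
      rw [Nat.div_div_eq_div_mul, Nat.factorial_succ, Nat.mul_comm]
    have hlt : x / k.factorial / (k + 1) < x / k.factorial :=
      Nat.div_lt_self hr (by omega)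
    by_cases hnext : (k + 1).factorial ≤ x
    · rw [hdiv]
      exact ih (k + 1) (by omega) hnext (by omega)
    · have hzero : x / (k + 1).factorial = 0 := Nat.div_eq_of_lt (by omega)
      rw [hdiv, hzero, fnLoop_zero_r]
      have : kOf x = k := kOf_unique x k hfle (by omega)
      omega

theorem fn_oeis_eq (x : Nat) (hx : 1 ≤ x) : fn_oeis x = kOf x := by
  unfold fn_oeis
  have h := fnLoop_spec x x 1 (by omega) (by simpa [Nat.factorial] using hx)
    (by simp [Nat.factorial])
  rw [show x / Nat.factorial 1 = x by simp [Nat.factorial]] at h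
  omega

-- B's incremental loop advances (k, k!) to (kOf prim, (kOf prim)!); its k stays below prim,
-- so prim - k ≤ fuel suffices
theorem advB_spec : ∀ (fuel k fact prim : Nat), 1 ≤ k → fact = k.factorial →
    k.factorial ≤ prim → prim - k ≤ fuel →
    advB fuel k fact prim = (kOf prim, (kOf prim).factorial) := by
  intro fuel
  induction fuel with
  | zero =>
    intro k fact prim hk hfact hle hfuel
    rw [advB]
    have hself : k + 1 ≤ (k + 1).factorial := Nat.self_le_factorial (k + 1)
    have hlt : prim < (k + 1).factorial := by omega
    rw [kOf_unique prim k hle hlt, hfact]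
  | succ f ih =>
    intro k fact prim hk hfact hle hfuel
    rw [advB]
    by_cases h : fact * (k + 1) ≤ prim
    · rw [if_pos h]
      have hfs : fact * (k + 1) = (k + 1).factorial := by
        rw [hfact, Nat.factorial_succ, Nat.mul_comm]
      have hkp : k + 1 ≤ prim := by
        have h1 : k + 1 ≤ fact * (k + 1) :=
          Nat.le_mul_of_pos_left _ (hfact ▸ Nat.factorial_pos k)
        omega
      exact ih (k + 1) _ prim (by omega) hfs (by omega) (by omega)
    · rw [if_neg h]
      have hlt : prim < (k + 1).factorial := by
        rw [Nat.factorial_succ, Nat.mul_comm, ← hfact]; omega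
      rw [kOf_unique prim k hle hlt, hfact]

-- the two sequence-building loops agree on any list of elements ≥ 2
theorem seqs_eq (ps : List Nat) : ∀ (i prim k fact : Nat),
    (∀ p ∈ ps, 2 ≤ p) → 1 ≤ i → 1 ≤ prim → k = kOf prim → fact = k.factorial →
    seqA ps i prim = seqB ps prim k fact (i == 1) := by
  induction ps with
  | nil => intro _ _ _ _ _ _ _ _ _; rfl
  | cons p rest ih =>
    intro i prim k fact hps hi hprim hk hfact
    have hp2 : 2 ≤ p := hps p (by simp)
    have hprim' : 1 ≤ prim * p := Nat.mul_pos hprim (by omega)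
    have hk1 : 1 ≤ k := hk ▸ kOf_pos prim hprim
    have hle : k.factorial ≤ prim * p := by
      calc k.factorial ≤ prim := hk ▸ kOf_fact_le prim hprim
        _ ≤ prim * p := Nat.le_mul_of_pos_right _ (by omega)
    have hadv : advB (prim * p) k fact (prim * p) = (kOf (prim * p), (kOf (prim * p)).factorial) :=
      advB_spec (prim * p) k fact (prim * p) hk1 hfact hle (Nat.sub_le _ _)
    unfold seqA seqB
    simp only [hadv]
    congr 1
    · by_cases h1 : i = 1
      · simp [h1]
      · have : (i == 1) = false := by simpa using h1
        rw [if_neg h1, this, if_neg (by simp)]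
        rw [fn_oeis_eq (prim * p) hprim']
    · have : (i + 1 == 1) = false := by simp; omega
      rw [← this]
      exact ih (i + 1) (prim * p) _ _ (fun q hq => hps q (by simp [hq])) (by omega) hprim' rfl rfl

theorem prList_two : prList 2 = [] := by decide

-- ===== VERDICT (by name: the statement is the Claim_ definition above) =====
theorem generate_A085302_spec : Claim_equal_generate_A085302 := by
  intro n_max _
  unfold Spec_generate_A085302 generate_A085302 generate_A085302_alt generate_primes
  obtain ⟨hAB, C, hPr⟩ := loops_eq n_max (2 ^ n_max.toNat + 2) 2 (by omega)
  rw [prList_two] at hAB hPr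
  have hmem : ∀ p ∈ loopA n_max (2 ^ n_max.toNat + 2) [] 2, 2 ≤ p := by
    rw [hPr]; exact prList_two_le
  have key := seqs_eq (loopA n_max (2 ^ n_max.toNat + 2) [] 2) 1 1 1 1 hmem (by omega) (by omega)
    kOf_one.symm (by simp [Nat.factorial])
  rw [← hAB]
  simpa using key
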